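-- pv_equiv track=rewrite | github.com/cirosantilli/project-euler-solvers | solvers/575.py | count_square_cells_by_class
-- ===== SOURCE A (Python) =====
-- def count_square_cells_by_class(n: int):
--     """
--     Returns (interior, edge_noncorner, corner) counts among the n perfect squares:
--     1^2, 2^2, ..., n^2 mapped onto an n x n grid numbered row-major from 1..n^2.
--     """
--     interior = edge = corner = 0
--     for s in range(1, n + 1):
--         x = s * s  # room number (1-indexed)
--         r = (x - 1) // n + 1
--         c = (x - 1) % n + 1
--
--         is_top_or_bottom = r == 1 or r == n
--         is_left_or_right = c == 1 or c == n
--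
--         if is_top_or_bottom and is_left_or_right:
--             corner += 1
--         elif is_top_or_bottom or is_left_or_right:
--             edge += 1
--         else:
--             interior += 1
--     return interior, edge, corner
-- ===== SOURCE B (Python) =====
-- def _isqrt(m):
--     r = 0
--     while (r + 1) * (r + 1) <= m:
--         r += 1
--     return r
--
--
-- def count_square_cells_by_class(n: int):
--     # Inclusion-exclusion: rows via integer sqrt (top row holds isqrt(n) squares,
--     # bottom row only n^2), columns via one residue pass; corners in closed form.
--     if n <= 0:
--         return (0, 0, 0)
--     if n == 1:
--         return (0, 0, 1)
--     t = _isqrt(n)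
--     sq = 1 if t * t == n else 0
--     left = right = 0
--     for s in range(1, n + 1):
--         m = s * s % n
--         if m == 0:
--             right += 1
--         elif m == 1:
--             left += 1
--     corner = 2 + sq
--     edge = t + left + right - 3 - 2 * sq
--     interior = n - edge - corner
--     return (interior, edge, corner)
-- ===== Notes on version B (the rewrite author's own statement) =====
-- stated objective: faster
-- what changed: A classifies every square per-cell via row/column divmod and branching; B instead computes the row and corner counts in closed form from the integer square root, keeps a single light pass counting the column residues of the squares modulo n, and combines the counts by inclusion-exclusion.
import Mathlib
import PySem

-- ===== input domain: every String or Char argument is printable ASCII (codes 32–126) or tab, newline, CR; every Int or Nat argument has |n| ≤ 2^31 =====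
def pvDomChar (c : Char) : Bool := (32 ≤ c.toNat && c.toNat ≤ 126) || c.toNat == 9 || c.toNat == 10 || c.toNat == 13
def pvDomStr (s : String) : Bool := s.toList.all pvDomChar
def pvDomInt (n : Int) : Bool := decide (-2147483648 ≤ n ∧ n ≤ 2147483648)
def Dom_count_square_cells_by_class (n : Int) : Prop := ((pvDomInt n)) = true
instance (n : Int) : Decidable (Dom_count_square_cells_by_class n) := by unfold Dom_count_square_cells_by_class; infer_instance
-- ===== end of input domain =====

-- B replaces A's per-cell row/column classification by closed forms (integer square root
-- for the rows and the corners) plus one residue-counting pass and inclusion–exclusion.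

-- ===== PORT A =====
-- loop body of A, one step per s
def stepA (n : Int) (acc : Int × Int × Int) (s : Int) : Int × Int × Int :=
  let x := s * s
  let r := PySem.Int.floordiv (x - 1) n + 1
  let c := PySem.Int.mod (x - 1) n + 1
  let isTopOrBottom : Bool := r == 1 || r == n
  let isLeftOrRight : Bool := c == 1 || c == n
  if isTopOrBottom && isLeftOrRight then (acc.1, acc.2.1, acc.2.2 + 1)
  else if isTopOrBottom || isLeftOrRight then (acc.1, acc.2.1 + 1, acc.2.2)
  else (acc.1 + 1, acc.2.1, acc.2.2)

def count_square_cells_by_class (n : Int) : List Int :=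
  let res := (PySem.List.pyRange 1 (n + 1) 1).foldl (stepA n) (0, 0, 0)
  [res.1, res.2.1, res.2.2]

-- ===== PORT B =====
-- B's hand-written integer square root loop (_isqrt in Source B)
def isqrtLoop (m r : Int) : Int :=
  if h : (r + 1) * (r + 1) ≤ m then isqrtLoop m (r + 1) else r
termination_by (m - r).toNat
decreasing_by
  have h1 : 0 ≤ r * (r + 1) := by
    by_cases hr : 0 ≤ r
    · exact mul_nonneg hr (by omega)
    · have := mul_nonneg (show (0:Int) ≤ -r by omega) (show (0:Int) ≤ -(r+1) by omega)
      nlinarith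
  have h2 : r + 1 ≤ m := by nlinarith
  omega

-- loop body of B's residue pass, acc = (left, right)
def stepB (n : Int) (acc : Int × Int) (s : Int) : Int × Int :=
  let m := PySem.Int.mod (s * s) n
  if m == 0 then (acc.1, acc.2 + 1)
  else if m == 1 then (acc.1 + 1, acc.2)
  else acc

def count_square_cells_by_class_alt (n : Int) : List Int :=
  if n ≤ 0 then [0, 0, 0]
  else if n = 1 then [0, 0, 1]
  else
    let t := isqrtLoop n 0
    let sq : Int := if t * t = n then 1 else 0
    let lr := (PySem.List.pyRange 1 (n + 1) 1).foldl (stepB n) (0, 0)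
    let corner := 2 + sq
    let edge := t + lr.1 + lr.2 - 3 - 2 * sq
    let interior := n - edge - corner
    [interior, edge, corner]

-- ===== PRECONDITION & SPEC =====
def Spec_count_square_cells_by_class (n : Int) (out : List Int) : Prop := out = count_square_cells_by_class_alt n
instance (n : Int) (out : List Int) : Decidable (Spec_count_square_cells_by_class n out) := by unfold Spec_count_square_cells_by_class; infer_instance

-- ===== CLAIM (what is proved, stated in full; the proofs are below) =====
def Claim_equal_count_square_cells_by_class : Prop := ∀ (n : Int), Dom_count_square_cells_by_class n → Spec_count_square_cells_by_class n (count_square_cells_by_class n)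

-- ===== LEMMAS AND PROOFS =====

-- the classification booleans A's step computes
def tbA (n s : Int) : Bool := PySem.Int.floordiv (s * s - 1) n + 1 == 1 || PySem.Int.floordiv (s * s - 1) n + 1 == n
def lrA (n s : Int) : Bool := PySem.Int.mod (s * s - 1) n + 1 == 1 || PySem.Int.mod (s * s - 1) n + 1 == n
-- the residue booleans B's step tests
def pRB (n s : Int) : Bool := PySem.Int.mod (s * s) n == 0
def pLB (n s : Int) : Bool := !pRB n s && (PySem.Int.mod (s * s) n == 1)

lemma stepA_eq (n : Int) (acc : Int × Int × Int) (s : Int) :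
    stepA n acc s =
      if tbA n s && lrA n s then (acc.1, acc.2.1, acc.2.2 + 1)
      else if tbA n s || lrA n s then (acc.1, acc.2.1 + 1, acc.2.2)
      else (acc.1 + 1, acc.2.1, acc.2.2) := rfl

lemma stepB_eq (n : Int) (acc : Int × Int) (s : Int) :
    stepB n acc s =
      if pRB n s then (acc.1, acc.2 + 1)
      else if pLB n s then (acc.1 + 1, acc.2)
      else acc := by
  simp only [stepB, pLB, pRB]
  by_cases h0 : PySem.Int.mod (s * s) n = 0 <;> simp [h0]

-- fold of A's step = branch counts
lemma foldA_count (n : Int) (l : List Int) (i e c : Int) :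
    l.foldl (stepA n) (i, e, c) =
      (i + (l.countP (fun s => !(tbA n s && lrA n s) && !(tbA n s || lrA n s)) : Int),
       e + (l.countP (fun s => !(tbA n s && lrA n s) && (tbA n s || lrA n s)) : Int),
       c + (l.countP (fun s => tbA n s && lrA n s) : Int)) := by
  induction l generalizing i e c with
  | nil => simp
  | cons x xs ih =>
    simp only [List.foldl_cons, stepA_eq, List.countP_cons]
    rcases h1 : (tbA n x && lrA n x) with _ | _ <;>
      rcases h2 : (tbA n x || lrA n x) with _ | _ <;>
      simp [h1, h2, ih, Prod.ext_iff] <;> omega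

-- fold of B's step = branch counts
lemma foldB_count (n : Int) (l : List Int) (a b : Int) :
    l.foldl (stepB n) (a, b) =
      (a + (l.countP (pLB n) : Int), b + (l.countP (pRB n) : Int)) := by
  induction l generalizing a b with
  | nil => simp
  | cons x xs ih =>
    simp only [List.foldl_cons, stepB_eq, List.countP_cons]
    rcases h1 : pRB n x with _ | _
    · rcases h2 : pLB n x with _ | _ <;> simp [h1, h2, ih, Prod.ext_iff] <;> omega
    · have h2 : pLB n x = false := by simp [pLB, h1]
      simp [h1, h2, ih, Prod.ext_iff] <;> omega

-- countP of a disjoint disjunction splits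
lemma countP_or_of_disjoint (l : List Int) (p q : Int → Bool)
    (h : ∀ x ∈ l, p x = true → q x = false) :
    l.countP (fun s => p s || q s) = l.countP p + l.countP q := by
  induction l with
  | nil => simp
  | cons x xs ih =>
    have hx := h x (by simp)
    have ih' := ih (fun y hy => h y (by simp [hy]))
    simp only [List.countP_cons, ih']
    rcases h1 : p x with _ | _
    · rcases h2 : q x with _ | _ <;> simp [h1, h2] <;> omega
    · have h2 := hx h1
      simp [h1, h2]
      omega

lemma countP_and_not (l : List Int) (p q : Int → Bool) :
    l.countP (fun s => !p s && q s) + l.countP (fun s => p s && q s) = l.countP q := by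
  induction l with
  | nil => simp
  | cons x xs ih =>
    simp only [List.countP_cons]
    rcases h1 : p x with _ | _ <;> rcases h2 : q x with _ | _ <;> simp [h1, h2] <;> omega

lemma countP_ie (l : List Int) (p q : Int → Bool) :
    l.countP (fun s => p s || q s) + l.countP (fun s => p s && q s) = l.countP p + l.countP q := by
  induction l with
  | nil => simp
  | cons x xs ih =>
    simp only [List.countP_cons]
    rcases h1 : p x with _ | _ <;> rcases h2 : q x with _ | _ <;> simp [h1, h2] <;> omega

lemma countP_not_add (l : List Int) (q : Int → Bool) :
    l.countP (fun s => !q s) + l.countP q = l.length := by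
  induction l with
  | nil => simp
  | cons x xs ih =>
    simp only [List.countP_cons, List.length_cons]
    rcases h1 : q x with _ | _ <;> simp [h1] <;> omega

-- count of a point predicate on a stride-1 range
lemma countP_point (a b c : Int) (h1 : a ≤ c) (h2 : c < b) :
    (PySem.List.pyRange a b 1).countP (fun s => s == c) = 1 := by
  rw [PySem.List.pyRange_one_append a c b (by omega) (by omega),
      PySem.List.pyRange_one_cons h2, List.countP_append, List.countP_cons]
  have hl : (PySem.List.pyRange a c 1).countP (fun s => s == c) = 0 := by
    apply List.countP_eq_zero.mpr
    intro x hx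
    have := (PySem.List.mem_pyRange_one).mp hx
    simp only [beq_iff_eq]
    omega
  have hr : (PySem.List.pyRange (c + 1) b 1).countP (fun s => s == c) = 0 := by
    apply List.countP_eq_zero.mpr
    intro x hx
    have := (PySem.List.mem_pyRange_one).mp hx
    simp only [beq_iff_eq]
    omega
  simp [hl, hr]

-- count of a threshold predicate on [1, n]
lemma countP_thresh (n t : Int) (h1 : 0 ≤ t) (h2 : t ≤ n) :
    (PySem.List.pyRange 1 (n + 1) 1).countP (fun s => decide (s ≤ t)) = t.toNat := by
  rw [PySem.List.pyRange_one_append 1 (t + 1) (n + 1) (by omega) (by omega), List.countP_append]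
  have hl : (PySem.List.pyRange 1 (t + 1) 1).countP (fun s => decide (s ≤ t)) =
      (PySem.List.pyRange 1 (t + 1) 1).length := by
    apply List.countP_eq_length.mpr
    intro x hx
    have := (PySem.List.mem_pyRange_one).mp hx
    simp only [decide_eq_true_eq]
    omega
  have hr : (PySem.List.pyRange (t + 1) (n + 1) 1).countP (fun s => decide (s ≤ t)) = 0 := by
    apply List.countP_eq_zero.mpr
    intro x hx
    have := (PySem.List.mem_pyRange_one).mp hx
    simp only [decide_eq_true_eq]
    omega
  rw [hl, hr, PySem.List.length_pyRange_one]
  omega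

-- specification of B's integer square root loop
lemma isqrtLoop_spec (m r : Int) : 0 ≤ r → r * r ≤ m →
    r ≤ isqrtLoop m r ∧ (isqrtLoop m r) * (isqrtLoop m r) ≤ m ∧
      m < (isqrtLoop m r + 1) * (isqrtLoop m r + 1) := by
  induction r using isqrtLoop.induct (m := m) with
  | case1 r h ih =>
    intro hr hrm
    have hih := ih (by omega) h
    rw [isqrtLoop, dif_pos h]
    exact ⟨by have := hih.1; omega, hih.2.1, hih.2.2⟩
  | case2 r h =>
    intro hr hrm
    rw [isqrtLoop, dif_neg h]
    exact ⟨le_refl r, hrm, not_le.mp h⟩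

-- A's row test, characterised for 1 ≤ s ≤ n, 2 ≤ n
lemma tbA_iff (n s : Int) (hn : 2 ≤ n) (h1 : 1 ≤ s) (h2 : s ≤ n) :
    tbA n s = (decide (s * s ≤ n) || (s == n)) := by
  have hx1 : 1 ≤ s * s := by nlinarith
  have hxn : s * s ≤ n * n := by nlinarith
  rw [Bool.eq_iff_iff]
  simp only [tbA, Bool.or_eq_true, beq_iff_eq, decide_eq_true_eq]
  constructor
  · rintro (h | h)
    · have h' : PySem.Int.floordiv (s * s - 1) n = 0 := by omega
      have := (PySem.Int.floordiv_eq_iff_of_pos (by omega)).mp h'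
      left; omega
    · have h' : PySem.Int.floordiv (s * s - 1) n = n - 1 := by omega
      have hb := (PySem.Int.floordiv_eq_iff_of_pos (by omega)).mp h'
      right
      by_contra hne
      have hs : s ≤ n - 1 := by omega
      have : s * s ≤ (n - 1) * (n - 1) := by nlinarith
      nlinarith [hb.1]
  · rintro (h | h)
    · left
      have h' : PySem.Int.floordiv (s * s - 1) n = 0 :=
        (PySem.Int.floordiv_eq_iff_of_pos (by omega)).mpr (by constructor <;> nlinarith)
      omega
    · right
      subst h
      have h' : PySem.Int.floordiv (s * s - 1) s = s - 1 :=
        (PySem.Int.floordiv_eq_iff_of_pos (by omega)).mpr (by constructor <;> nlinarith)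
      omega

-- A's column test, characterised via B's residues for 2 ≤ n
lemma lrA_iff (n s : Int) (hn : 2 ≤ n) :
    lrA n s = ((PySem.Int.mod (s * s) n == 1) || (PySem.Int.mod (s * s) n == 0)) := by
  have h0 : (0 : Int) < n := by omega
  have hρ0 : 0 ≤ PySem.Int.mod (s * s - 1) n := PySem.Int.mod_nonneg _ h0
  have hρ1 : PySem.Int.mod (s * s - 1) n < n := PySem.Int.mod_lt _ h0
  set ρ := PySem.Int.mod (s * s - 1) n with hρ
  have h := PySem.Int.floordiv_mul_add_mod (s * s - 1) n
  rw [← hρ] at h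
  have hc : n * PySem.Int.floordiv (s * s - 1) n = PySem.Int.floordiv (s * s - 1) n * n :=
    mul_comm _ _
  have hkey : s * s = (ρ + 1) + n * PySem.Int.floordiv (s * s - 1) n := by omega
  have hmod : PySem.Int.mod (s * s) n = (ρ + 1) % n := by
    rw [PySem.Int.mod_eq_emod_of_pos h0, hkey, Int.add_mul_emod_self_left]
  rw [Bool.eq_iff_iff]
  simp only [lrA, ← hρ, Bool.or_eq_true, beq_iff_eq]
  rcases eq_or_lt_of_le (by omega : ρ + 1 ≤ n) with he | hlt
  · have hz : PySem.Int.mod (s * s) n = 0 := by rw [hmod, he, Int.emod_self]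
    constructor
    · rintro (h' | h')
      · omega
      · right; exact hz
    · rintro (h' | h')
      · omega
      · right; omega
  · have hv : PySem.Int.mod (s * s) n = ρ + 1 := by
      rw [hmod, Int.emod_eq_of_lt (by omega) hlt]
    constructor
    · rintro (h' | h')
      · left; omega
      · omega
    · rintro (h' | h') <;> [left; right] <;> omega

-- the corner predicate, characterised for 1 ≤ s ≤ n, 2 ≤ n, t = ⌊√n⌋
lemma corner_iff (n s t : Int) (hn : 2 ≤ n) (h1 : 1 ≤ s) (h2 : s ≤ n)
    (ht1 : 1 ≤ t) (ht2 : t * t ≤ n) (ht3 : n < (t + 1) * (t + 1)) :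
    (tbA n s && lrA n s) = ((s == 1) || ((s == n) || (decide (t * t = n) && (s == t)))) := by
  have hx1 : 1 ≤ s * s := by nlinarith
  rw [tbA_iff n s hn h1 h2, lrA_iff n s hn, Bool.eq_iff_iff]
  simp only [Bool.and_eq_true, Bool.or_eq_true, beq_iff_eq, decide_eq_true_eq]
  have h0 : (0 : Int) < n := by omega
  constructor
  · rintro ⟨ha | ha, hb | hb⟩
    · -- s*s ≤ n, s*s % n = 1
      rcases eq_or_lt_of_le ha with he | hlt
      · rw [PySem.Int.mod_eq_emod_of_pos h0, he, Int.emod_self] at hb; omega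
      · rw [PySem.Int.mod_eq_emod_of_pos h0, Int.emod_eq_of_lt (by nlinarith) hlt] at hb
        have hs1 : s ≤ 1 := by nlinarith
        left; omega
    · -- s*s ≤ n, s*s % n = 0 : s*s = n, s = t
      rcases eq_or_lt_of_le ha with he | hlt
      · right; right
        have hst : s = t := by
          by_contra hne
          rcases lt_or_gt_of_ne hne with hlt' | hgt
          · nlinarith
          · nlinarith
        refine ⟨?_, hst⟩
        rw [← hst]; omega
      · rw [PySem.Int.mod_eq_emod_of_pos h0, Int.emod_eq_of_lt (by nlinarith) hlt] at hb
        exfalso; omega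
    · right; left; omega
    · right; left; omega
  · rintro (hs | hs | ⟨hsq, hs⟩)
    · subst hs
      refine ⟨Or.inl (by omega), Or.inl ?_⟩
      rw [PySem.Int.mod_eq_emod_of_pos h0]
      have hone : (1 : Int) * 1 = 1 := by norm_num
      rw [hone, Int.emod_eq_of_lt (by omega) (by omega)]
    · subst hs
      refine ⟨Or.inr rfl, Or.inr ?_⟩
      rw [PySem.Int.mod_eq_emod_of_pos h0]
      exact Int.mul_emod_right s s
    · subst hs
      refine ⟨Or.inl (by omega), Or.inr ?_⟩
      rw [PySem.Int.mod_eq_emod_of_pos h0, hsq, Int.emod_self]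

-- main case: n ≥ 2
lemma main_ge_two (n : Int) (hn : 2 ≤ n) :
    count_square_cells_by_class n = count_square_cells_by_class_alt n := by
  have h0 : ¬ n ≤ 0 := by omega
  have h1 : ¬ n = 1 := by omega
  obtain ⟨ht0, ht2, ht3⟩ := isqrtLoop_spec n 0 (le_refl 0)
    (by simpa using (show (0:Int) ≤ n by omega))
  set t := isqrtLoop n 0 with htdef
  have ht1 : 1 ≤ t := by
    rcases eq_or_lt_of_le ht0 with h | h
    · exfalso; rw [← h] at ht3; norm_num at ht3; omega
    · omega
  have htn : t ≤ n := by nlinarith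
  set S := PySem.List.pyRange 1 (n + 1) 1 with hSdef
  have hmem : ∀ x ∈ S, 1 ≤ x ∧ x < n + 1 := fun x hx => (PySem.List.mem_pyRange_one).mp hx
  have hlen : S.length = n.toNat := by rw [hSdef, PySem.List.length_pyRange_one]; omega
  -- corner count
  have d1 : ∀ x ∈ S, (x == 1) = true → ((x == n) || (decide (t * t = n) && (x == t))) = false := by
    intro x hx hp
    simp only [beq_iff_eq] at hp
    simp only [Bool.or_eq_false_iff]
    constructor
    · simp only [beq_eq_false_iff_ne, ne_eq]; omega
    · by_cases hq : t * t = n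
      · simp only [hq, decide_true, Bool.true_and, beq_eq_false_iff_ne, ne_eq]
        intro he
        have h1t : t = 1 := by omega
        rw [h1t] at hq; norm_num at hq; omega
      · simp [hq]
  have d2 : ∀ x ∈ S, (x == n) = true → (decide (t * t = n) && (x == t)) = false := by
    intro x hx hp
    simp only [beq_iff_eq] at hp
    by_cases hq : t * t = n
    · simp only [hq, decide_true, Bool.true_and, beq_eq_false_iff_ne, ne_eq]
      intro he
      have htn' : t = n := by omega
      rw [htn'] at hq; nlinarith
    · simp [hq]
  have hC : S.countP (fun s => tbA n s && lrA n s) = 2 + (if t * t = n then 1 else 0) := by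
    have hptw : S.countP (fun s => tbA n s && lrA n s)
        = S.countP (fun s => (s == 1) || ((s == n) || (decide (t * t = n) && (s == t)))) := by
      apply List.countP_congr
      intro x hx
      obtain ⟨hx1, hx2⟩ := hmem x hx
      rw [corner_iff n x t hn hx1 (by omega) ht1 ht2 ht3]
    rw [hptw, countP_or_of_disjoint S _ _ d1, countP_or_of_disjoint S _ _ d2, hSdef,
        countP_point 1 (n + 1) 1 (by omega) (by omega),
        countP_point 1 (n + 1) n (by omega) (by omega)]
    by_cases hq : t * t = n
    · have hf : (fun (s : Int) => decide (t * t = n) && (s == t)) = (fun s => s == t) := by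
        funext s; simp [hq]
      rw [hf, countP_point 1 (n + 1) t (by omega) (by omega), if_pos hq]
    · have hf : (fun (s : Int) => decide (t * t = n) && (s == t)) = (fun _ => false) := by
        funext s; simp [hq]
      rw [hf, List.countP_false, if_neg hq]
      simp [Function.const]
  -- top+bottom row count
  have d3 : ∀ x ∈ S, (decide (x * x ≤ n)) = true → (x == n) = false := by
    intro x hx hp
    obtain ⟨hx1, hx2⟩ := hmem x hx
    simp only [decide_eq_true_eq] at hp
    simp only [beq_eq_false_iff_ne, ne_eq]
    intro he; rw [he] at hp; nlinarith
  have hT : S.countP (fun s => tbA n s) = t.toNat + 1 := by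
    have hptw : S.countP (fun s => tbA n s)
        = S.countP (fun s => decide (s * s ≤ n) || (s == n)) := by
      apply List.countP_congr
      intro x hx
      obtain ⟨hx1, hx2⟩ := hmem x hx
      rw [tbA_iff n x hn hx1 (by omega)]
    have hptw2 : S.countP (fun s => decide (s * s ≤ n)) = S.countP (fun s => decide (s ≤ t)) := by
      apply List.countP_congr
      intro x hx
      obtain ⟨hx1, hx2⟩ := hmem x hx
      simp only [decide_eq_true_eq]
      constructor
      · intro h; by_contra hc; push_neg at hc; nlinarith
      · intro h; nlinarith
    rw [hptw, countP_or_of_disjoint S _ _ d3, hptw2, hSdef, countP_thresh n t (by omega) htn,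
        countP_point 1 (n + 1) n (by omega) (by omega)]
  -- column counts
  have hpl : S.countP (pLB n) = S.countP (fun s => PySem.Int.mod (s * s) n == 1) := by
    apply List.countP_congr
    intro x hx
    by_cases hm : PySem.Int.mod (x * x) n = 1 <;> simp [pLB, pRB, hm]
  have d4 : ∀ x ∈ S, (PySem.Int.mod (x * x) n == 1) = true → (PySem.Int.mod (x * x) n == 0) = false := by
    intro x hx hp
    simp only [beq_iff_eq] at hp
    simp only [beq_eq_false_iff_ne, ne_eq]
    omega
  have hr0 : S.countP (pRB n) = S.countP (fun s => PySem.Int.mod (s * s) n == 0) := by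
    apply List.countP_congr
    intro x hx
    simp [pRB]
  have hLr : S.countP (fun s => lrA n s)
      = S.countP (pLB n) + S.countP (pRB n) := by
    have hptw : S.countP (fun s => lrA n s)
        = S.countP (fun s => (PySem.Int.mod (s * s) n == 1) || (PySem.Int.mod (s * s) n == 0)) := by
      apply List.countP_congr
      intro x hx
      rw [lrA_iff n x hn]
    rw [hptw, countP_or_of_disjoint S _ _ d4, ← hpl, ← hr0]
  have hQ := countP_ie S (fun s => tbA n s) (fun s => lrA n s)
  have hE2 := countP_and_not S (fun s => tbA n s && lrA n s) (fun s => tbA n s || lrA n s)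
  have hPQ : S.countP (fun s => (tbA n s && lrA n s) && (tbA n s || lrA n s))
      = S.countP (fun s => tbA n s && lrA n s) := by
    apply List.countP_congr
    intro x hx
    rcases h1 : tbA n x with _ | _ <;> rcases h2 : lrA n x with _ | _ <;> simp [h1, h2]
  have hIptw : S.countP (fun s => !(tbA n s && lrA n s) && !(tbA n s || lrA n s))
      = S.countP (fun s => !(tbA n s || lrA n s)) := by
    apply List.countP_congr
    intro x hx
    rcases h1 : tbA n x with _ | _ <;> rcases h2 : lrA n x with _ | _ <;> simp [h1, h2]
  have hIn := countP_not_add S (fun s => tbA n s || lrA n s)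
  -- assemble
  simp only [count_square_cells_by_class, count_square_cells_by_class_alt, ← hSdef, ← htdef]
  rw [if_neg h0, if_neg h1]
  simp only [foldA_count, foldB_count]
  by_cases hq : t * t = n
  · rw [if_pos hq] at hC ⊢
    simp only [List.cons.injEq, and_true]
    refine ⟨?_, ?_, ?_⟩ <;> omega
  · rw [if_neg hq] at hC ⊢
    simp only [List.cons.injEq, and_true]
    refine ⟨?_, ?_, ?_⟩ <;> omega

-- ===== VERDICT (by name: the statement is the Claim_ definition above) =====
theorem count_square_cells_by_class_spec : Claim_equal_count_square_cells_by_class := by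
  intro n _
  unfold Spec_count_square_cells_by_class
  by_cases h0 : n ≤ 0
  · have hnil : PySem.List.pyRange 1 (n + 1) 1 = [] := PySem.List.pyRange_one_eq_nil (by omega)
    simp [count_square_cells_by_class, count_square_cells_by_class_alt, hnil, h0]
  · rcases eq_or_lt_of_le (by omega : 1 ≤ n) with h1 | h1
    · rw [← h1]; decide
    · exact main_ge_two n (by omega)
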